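-- pv_equiv track=rewrite | github.com/Cavtheman/skolearbejde | funstuff/foobarwithgoogle/minionwork.py | solution
-- ===== SOURCE A (Python) =====
-- def solution(data, n):
--     counts = {}
--     for elem in data:
--         if elem in counts:
--             counts[elem] = counts[elem]+1
--         else:
--             counts[elem] = 1
--     #ret_val = []
--     ret_val = list (filter (lambda a : counts[a] <= n, data))
--     return ret_val
-- ===== SOURCE B (Python) =====
-- def solution(data, n):
--     # Sort a copy, scan the runs of equal elements, and collect the values whose
--     # run is longer than n into a "bad" set; then keep the original order by
--     # filtering data against that set.
--     bad = set()
--     prev = None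
--     run = 0
--     for x in sorted(data):
--         if run and x == prev:
--             run += 1
--         else:
--             if run > n:
--                 bad.add(prev)
--             prev = x
--             run = 1
--     if run > n:
--         bad.add(prev)
--     return [v for v in data if v not in bad]
-- ===== Notes on version B (the rewrite author's own statement) =====
-- stated objective: alternative
-- what changed: Replaces the hash-count dictionary by a sort: B sorts a copy, scans the runs of equal elements to collect values occurring more than n times into a set, then filters data by set membership.
import Mathlib
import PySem

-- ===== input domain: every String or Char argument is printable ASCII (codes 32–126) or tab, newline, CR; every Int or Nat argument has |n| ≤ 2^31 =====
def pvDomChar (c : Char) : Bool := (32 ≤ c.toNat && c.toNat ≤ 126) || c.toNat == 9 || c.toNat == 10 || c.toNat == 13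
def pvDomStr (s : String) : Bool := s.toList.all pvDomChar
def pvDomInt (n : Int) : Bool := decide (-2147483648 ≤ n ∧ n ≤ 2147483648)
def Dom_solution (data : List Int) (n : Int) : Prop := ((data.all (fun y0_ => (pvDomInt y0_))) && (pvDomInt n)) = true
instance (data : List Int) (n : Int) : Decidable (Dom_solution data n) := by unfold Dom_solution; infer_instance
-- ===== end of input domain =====

-- B replaces A's hash-count dictionary by a sort-and-scan: sort a copy, collect the
-- values whose run of equal elements is longer than n into a set, filter by that set.

-- ===== PORT A =====
def solution (data : List Int) (n : Int) : List Int :=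
  let counts : PySem.Dict Int Int :=
    data.foldl (fun counts elem =>
      if counts.contains elem then counts.insert elem (counts.getD elem 0 + 1)
      else counts.insert elem 1) PySem.Dict.empty
  data.filter (fun a => counts.getD a 0 ≤ n)

-- ===== PORT B =====
-- one iteration of B's for-loop over the sorted copy; state = (prev, run, bad)
def altStep (n : Int) (st : Int × Int × PySem.Set Int) (x : Int) : Int × Int × PySem.Set Int :=
  if st.2.1 ≠ 0 ∧ x = st.1 then (st.1, st.2.1 + 1, st.2.2)
  else (x, 1, if st.2.1 > n then st.2.2.add st.1 else st.2.2)

-- the final 'if run > n: bad.add(prev)' after the loop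
def altClose (n : Int) (st : Int × Int × PySem.Set Int) : PySem.Set Int :=
  if st.2.1 > n then st.2.2.add st.1 else st.2.2

def solution_alt (data : List Int) (n : Int) : List Int :=
  -- prev starts as a dummy 0 (Python's None): it is only read once run > 0
  let bad := altClose n ((PySem.List.sorted data (fun x => x) false).foldl (altStep n) (0, 0, PySem.Set.empty))
  data.filter (fun v => !(PySem.Set.contains bad v))

-- ===== PRECONDITION & SPEC =====
def Spec_solution (data : List Int) (n : Int) (out : List Int) : Prop := out = solution_alt data n
instance (data : List Int) (n : Int) (out : List Int) : Decidable (Spec_solution data n out) := by unfold Spec_solution; infer_instance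

-- ===== CLAIM (what is proved, stated in full; the proofs are below) =====
def Claim_equal_solution : Prop := ∀ (data : List Int) (n : Int), Dom_solution data n → Spec_solution data n (solution data n)

-- ===== LEMMAS AND PROOFS =====

theorem count_cons_ne (a b : Int) (l : List Int) (h : a ≠ b) :
    List.count a (b :: l) = List.count a l := by
  have hba : b ≠ a := Ne.symm h
  simp [hba]

-- A's per-element dict update (branching on membership) is the insert-getD+1 update.
theorem solution_step_eq (d : PySem.Dict Int Int) (x : Int) :
    (if d.contains x then d.insert x (d.getD x 0 + 1) else d.insert x 1)
      = d.insert x (d.getD x 0 + 1) := by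
  by_cases h : d.contains x = true
  · simp [h]
  · have hnone : d.get? x = none := by
      rw [PySem.Dict.get?_eq_none_iff_contains]
      simpa using h
    simp [h, PySem.Dict.getD, hnone]

-- A's counts dictionary maps each value to its multiplicity in data.
theorem solution_counts_eq (data : List Int) (v : Int) :
    (data.foldl (fun counts elem =>
      if counts.contains elem then counts.insert elem (counts.getD elem 0 + 1)
      else counts.insert elem 1) PySem.Dict.empty).getD v 0 = (data.count v : Int) := by
  have hfun : (fun (counts : PySem.Dict Int Int) (elem : Int) =>
      if counts.contains elem then counts.insert elem (counts.getD elem 0 + 1)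
      else counts.insert elem 1)
      = fun counts elem => counts.insert elem (counts.getD elem 0 + 1) := by
    funext d x; exact solution_step_eq d x
  rw [hfun, PySem.Dict.getD_foldl_insert_add_one]
  simp

-- membership after the 'if run > n: bad.add(prev)' flush
theorem mem_flush (n run prev v : Int) (bad : PySem.Set Int) :
    (v ∈ (if run > n then bad.add prev else bad)) ↔ v ∈ bad ∨ (n < run ∧ v = prev) := by
  split_ifs with h
  · rw [PySem.Set.mem_add]
    constructor
    · rintro (hv | rfl)
      exacts [Or.inl hv, Or.inr ⟨h, rfl⟩]
    · rintro (hv | ⟨_, rfl⟩)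
      exacts [Or.inl hv, Or.inr rfl]
  · constructor
    · intro hv; exact Or.inl hv
    · rintro (hv | ⟨hn, _⟩)
      exacts [hv, absurd hn h]

-- Run-scan invariant: folding B's step over a sorted tail l (all ≥ prev) with an open
-- run (prev, run > 0) and then closing yields 'bad ∪ {values with total run > n}'.
theorem altFold_mem (n v : Int) :
    ∀ (l : List Int) (prev run : Int) (bad : PySem.Set Int),
      l.Pairwise (· ≤ ·) → (∀ y ∈ l, prev ≤ y) → 0 < run →
      (v ∈ altClose n (l.foldl (altStep n) (prev, run, bad)) ↔
        v ∈ bad ∨ (n < run + (l.count prev : Int) ∧ v = prev)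
          ∨ (v ∈ l ∧ v ≠ prev ∧ n < (l.count v : Int))) := by
  intro l
  induction l with
  | nil =>
    intro prev run bad _ _ _
    simp only [List.foldl_nil, altClose, List.count_nil, List.not_mem_nil, false_and,
      or_false, Nat.cast_zero, add_zero]
    exact mem_flush n run prev v bad
  | cons x t ih =>
    intro prev run bad hpw hge hrun
    have hpw' : t.Pairwise (· ≤ ·) := hpw.tail
    have hxle : ∀ y ∈ t, x ≤ y := by
      intro y hy; exact (List.pairwise_cons.mp hpw).1 y hy
    by_cases hx : x = prev
    · -- run continues
      subst hx
      have hstep : altStep n (x, run, bad) x = (x, run + 1, bad) := by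
        simp [altStep, ne_of_gt hrun]
      rw [List.foldl_cons, hstep, ih x (run + 1) bad hpw' hxle (by omega)]
      constructor
      · rintro (hv | ⟨hn, rfl⟩ | ⟨h1, h2, h3⟩)
        · exact Or.inl hv
        · exact Or.inr (Or.inl ⟨by rw [List.count_cons_self]; push_cast; omega, rfl⟩)
        · exact Or.inr (Or.inr ⟨List.mem_cons_of_mem _ h1, h2,
            by rw [count_cons_ne v x t h2]; exact h3⟩)
      · rintro (hv | ⟨hn, rfl⟩ | ⟨h1, h2, h3⟩)
        · exact Or.inl hv
        · exact Or.inr (Or.inl ⟨by rw [List.count_cons_self] at hn; push_cast at hn; omega, rfl⟩)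
        · have h1' : v ∈ t := (List.mem_cons.mp h1).resolve_left h2
          rw [count_cons_ne v x t h2] at h3
          exact Or.inr (Or.inr ⟨h1', h2, h3⟩)
    · -- new run starts at x; prev < x, so prev occurs nowhere in x :: t
      have hplt : prev < x := lt_of_le_of_ne (hge x List.mem_cons_self) (Ne.symm hx)
      have hnp : prev ∉ x :: t := by
        intro hmem
        rcases List.mem_cons.mp hmem with rfl | hmem
        · exact absurd rfl hx
        · exact absurd (hxle prev hmem) (by omega)
      have hstep : altStep n (prev, run, bad) x
          = (x, 1, if run > n then bad.add prev else bad) := by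
        simp [altStep, hx]
      rw [List.foldl_cons, hstep, ih x 1 _ hpw' hxle (by omega), mem_flush]
      have hcp : (x :: t).count prev = 0 := List.count_eq_zero.mpr hnp
      constructor
      · rintro ((hv | ⟨hn, rfl⟩) | ⟨hn, rfl⟩ | ⟨h1, h2, h3⟩)
        · exact Or.inl hv
        · exact Or.inr (Or.inl ⟨by rw [hcp]; omega, rfl⟩)
        · exact Or.inr (Or.inr ⟨List.mem_cons_self, hx,
            by rw [List.count_cons_self]; push_cast; omega⟩)
        · have hvp : v ≠ prev := fun e => hnp (e ▸ List.mem_cons_of_mem x h1)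
          exact Or.inr (Or.inr ⟨List.mem_cons_of_mem _ h1, hvp,
            by rw [count_cons_ne v x t h2]; exact h3⟩)
      · rintro (hv | ⟨hn, rfl⟩ | ⟨h1, h2, h3⟩)
        · exact Or.inl (Or.inl hv)
        · rw [hcp] at hn
          exact Or.inl (Or.inr ⟨by omega, rfl⟩)
        · by_cases hvx : v = x
          · subst hvx
            rw [List.count_cons_self] at h3
            exact Or.inr (Or.inl ⟨by push_cast at h3; omega, rfl⟩)
          · have h1' : v ∈ t := (List.mem_cons.mp h1).resolve_left hvx
            rw [count_cons_ne v x t hvx] at h3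
            exact Or.inr (Or.inr ⟨h1', hvx, h3⟩)

-- B's bad set contains exactly the data values with multiplicity > n.
theorem solution_alt_bad_mem (data : List Int) (n v : Int) (hv : v ∈ data) :
    (v ∈ altClose n ((PySem.List.sorted data (fun x => x) false).foldl (altStep n) (0, 0, PySem.Set.empty))
      ↔ n < (data.count v : Int)) := by
  have hperm : (PySem.List.sorted data (fun x => x) false).Perm data :=
    PySem.List.sorted_perm data (fun x => x) false
  have hcount : ∀ w : Int, (PySem.List.sorted data (fun x => x) false).count w = data.count w := by
    intro w; exact hperm.count_eq w
  have hvs : v ∈ PySem.List.sorted data (fun x => x) false := hperm.mem_iff.mpr hv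
  have hvpos : 0 < data.count v := List.count_pos_iff.mpr hv
  have hpw : (PySem.List.sorted data (fun x => x) false).Pairwise (· ≤ ·) := by
    have := PySem.List.sorted_pairwise (xs := data) (key := fun x => x)
    simpa using this
  rcases hs : PySem.List.sorted data (fun x => x) false with _ | ⟨x, t⟩
  · rw [hs] at hvs; exact absurd hvs (by simp)
  · rw [hs] at hpw hvs hcount
    have hxle : ∀ y ∈ t, x ≤ y := by
      intro y hy; exact (List.pairwise_cons.mp hpw).1 y hy
    have hstep0 : altStep n (0, 0, PySem.Set.empty) x
        = (x, 1, if (0 : Int) > n then PySem.Set.add PySem.Set.empty 0 else PySem.Set.empty) := by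
      simp [altStep]
    have hcx : (x :: t).count x = t.count x + 1 := List.count_cons_self
    rw [List.foldl_cons, hstep0,
      altFold_mem n v t x 1 _ hpw.tail hxle (by omega), mem_flush]
    constructor
    · rintro ((h0 | ⟨hn0, rfl⟩) | ⟨hn, rfl⟩ | ⟨h1, h2, h3⟩)
      · exact absurd h0 (by simp [PySem.Set.empty])
      · omega
      · rw [← hcount v, hcx]; omega
      · rw [← hcount v, count_cons_ne v x t h2]; exact h3
    · intro hn
      by_cases hvx : v = x
      · subst hvx
        refine Or.inr (Or.inl ⟨?_, rfl⟩)
        rw [← hcount v, hcx] at hn; push_cast at hn; omega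
      · have h1 : v ∈ t := (List.mem_cons.mp hvs).resolve_left hvx
        rw [← hcount v, count_cons_ne v x t hvx] at hn
        exact Or.inr (Or.inr ⟨h1, hvx, hn⟩)

-- ===== VERDICT (by name: the statement is the Claim_ definition above) =====
theorem solution_spec : Claim_equal_solution := by
  intro data n _
  unfold Spec_solution
  simp only [solution, solution_alt]
  apply List.filter_congr
  intro v hv
  rw [solution_counts_eq data v]
  have hbm := solution_alt_bad_mem data n v hv
  by_cases h : n < (data.count v : Int)
  · have hc : PySem.Set.contains
        (altClose n ((PySem.List.sorted data (fun x => x) false).foldl (altStep n)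
          (0, 0, PySem.Set.empty))) v = true :=
      (PySem.Set.contains_iff _ _).mpr (hbm.mpr h)
    rw [hc]
    simp only [Bool.not_true]
    exact decide_eq_false (by omega)
  · have hnc : PySem.Set.contains
        (altClose n ((PySem.List.sorted data (fun x => x) false).foldl (altStep n)
          (0, 0, PySem.Set.empty))) v = false := by
      rw [Bool.eq_false_iff]
      intro hc
      exact h (hbm.mp ((PySem.Set.contains_iff _ _).mp hc))
    rw [hnc]
    simp only [Bool.not_false]
    exact decide_eq_true (by omega)
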